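-- pv_equiv track=rewrite | github.com/luyizhou4/espnet | egs/codeswitching/asr/local_yzl23/text_norm/generate_espnet_json_moe.py | get_lidbf_label_ids
-- ===== SOURCE A (Python) =====
-- def get_lidbf_label_ids(label_ids, divider, lid_tokens):
--     ''' Given label ids, return lidbf label_ids
--         e.g. "english words 中 文" ==> "<EN> english words <CN> 中 文"
--         :param label_ids: list of int, label tokens
--         :param divider: unk token id, used as a divider
--         :lid_tokens: list of int tokens ids for <EN> and <CN>
--     '''
--     # for empty utterance, directly return
--     assert len(lid_tokens) == 2 # currently we only support CN/EN codeswitching mode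
--     assert divider > 0
--     if len(label_ids) == 0:
--         return label_ids
--     prev_lang_state = 0 if label_ids[0] < divider else 1 # 0 for en, 1 for cn
--     out_label_ids = [lid_tokens[prev_lang_state]] # add head language tokens
--
--     for label_token in label_ids:
--         lang_state = 0 if label_token < divider else 1
--         if lang_state == prev_lang_state:
--             out_label_ids.append(label_token)
--         else:
--             out_label_ids.extend([lid_tokens[lang_state], label_token])
--             # update current language state
--             prev_lang_state = lang_state
--     return out_label_ids
-- ===== SOURCE B (Python) =====
-- def get_lidbf_label_ids(label_ids, divider, lid_tokens):
--     ''' Insert language-id marker tokens at language boundaries.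
--         Built back-to-front: each token is paired with its predecessor,
--         scanned in reverse, and the reversed output is flipped at the end.
--     '''
--     assert len(lid_tokens) == 2 # currently we only support CN/EN codeswitching mode
--     assert divider > 0
--     if len(label_ids) == 0:
--         return label_ids
--     key = lambda t: 0 if t < divider else 1
--     prevs = [None] + label_ids[:-1]   # predecessor of each position (None for the head)
--     rev = []
--     for tok, prev in zip(reversed(label_ids), reversed(prevs)):
--         rev.append(tok)
--         if prev is None or key(tok) != key(prev):
--             rev.append(lid_tokens[key(tok)])
--     rev.reverse()
--     return rev
-- ===== Notes on version B (the rewrite author's own statement) =====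
-- stated objective: alternative
-- what changed: B pairs every token with its predecessor and builds the output back-to-front over the reversed pair list (marker appended after its token, whole list flipped once at the end), eliminating A's mutable prev_lang_state and head-marker special case.
import Mathlib
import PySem

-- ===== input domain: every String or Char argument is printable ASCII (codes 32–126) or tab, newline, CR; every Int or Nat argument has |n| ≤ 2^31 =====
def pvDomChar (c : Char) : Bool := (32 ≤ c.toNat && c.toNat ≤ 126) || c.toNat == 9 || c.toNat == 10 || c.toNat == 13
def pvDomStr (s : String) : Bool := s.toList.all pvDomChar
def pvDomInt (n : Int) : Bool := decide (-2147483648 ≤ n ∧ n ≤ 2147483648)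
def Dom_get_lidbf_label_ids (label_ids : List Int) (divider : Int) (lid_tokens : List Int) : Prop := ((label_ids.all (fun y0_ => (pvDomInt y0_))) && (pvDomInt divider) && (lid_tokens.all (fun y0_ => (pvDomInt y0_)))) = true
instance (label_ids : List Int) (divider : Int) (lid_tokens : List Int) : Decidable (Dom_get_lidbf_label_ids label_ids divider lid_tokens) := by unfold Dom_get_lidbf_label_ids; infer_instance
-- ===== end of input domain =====

-- B builds the output back-to-front from (token, predecessor) pairs instead of A's
-- forward scan with a mutable prev_lang_state; same cost, different decomposition.

-- ===== PORT A =====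
-- A's loop body: per-token branch on the language state, appending to the output
def pvStepA (divider : Int) (lid_tokens : List Int) (st : Nat × List Int) (tok : Int) : Nat × List Int :=
  let lang_state : Nat := if tok < divider then 0 else 1
  if lang_state = st.1 then (st.1, st.2 ++ [tok])
  else (lang_state, st.2 ++ [lid_tokens.getD lang_state 0, tok])

def get_lidbf_label_ids (label_ids : List Int) (divider : Int) (lid_tokens : List Int) : List Int :=
  match label_ids with
  | [] => label_ids
  | h :: _ =>
    let prev0 : Nat := if h < divider then 0 else 1
    (label_ids.foldl (pvStepA divider lid_tokens) (prev0, [lid_tokens.getD prev0 0])).2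

-- ===== PORT B =====
-- Source B's key lambda
def pvKey (divider t : Int) : Nat := if t < divider then 0 else 1

-- Source B's loop body: append the token, then the marker if prev is None or the key changed
def pvStepB (divider : Int) (lid_tokens : List Int) (rev : List Int) (p : Int × Option Int) : List Int :=
  let rev1 := rev ++ [p.1]
  match p.2 with
  | none => rev1 ++ [lid_tokens.getD (pvKey divider p.1) 0]
  | some prev =>
      if pvKey divider p.1 ≠ pvKey divider prev then
        rev1 ++ [lid_tokens.getD (pvKey divider p.1) 0]
      else rev1

-- zip(reversed(label_ids), reversed(prevs)): both lists have equal length here, so it is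
-- exactly the reverse of zip(label_ids, prevs)
def get_lidbf_label_ids_alt (label_ids : List Int) (divider : Int) (lid_tokens : List Int) : List Int :=
  if label_ids = [] then label_ids
  else
    let prevs : List (Option Int) := none :: label_ids.dropLast.map some
    (((label_ids.zip prevs).reverse).foldl (pvStepB divider lid_tokens) []).reverse

-- ===== PRECONDITION & SPEC =====
-- A asserts len(lid_tokens) == 2 and divider > 0; on other inputs A raises AssertionError.
def Pre_get_lidbf_label_ids (label_ids : List Int) (divider : Int) (lid_tokens : List Int) : Prop :=
  lid_tokens.length = 2 ∧ 0 < divider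
instance (label_ids : List Int) (divider : Int) (lid_tokens : List Int) : Decidable (Pre_get_lidbf_label_ids label_ids divider lid_tokens) := by unfold Pre_get_lidbf_label_ids; infer_instance

def pvWitness_get_lidbf_label_ids : List Int × Int × List Int := ([1, 7, 2], 5, [100, 101])

def Spec_get_lidbf_label_ids (label_ids : List Int) (divider : Int) (lid_tokens : List Int) (out : List Int) : Prop := out = get_lidbf_label_ids_alt label_ids divider lid_tokens
instance (label_ids : List Int) (divider : Int) (lid_tokens : List Int) (out : List Int) : Decidable (Spec_get_lidbf_label_ids label_ids divider lid_tokens out) := by unfold Spec_get_lidbf_label_ids; infer_instance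

-- ===== CLAIM (what is proved, stated in full; the proofs are below) =====
def Claim_equal_get_lidbf_label_ids : Prop := ∀ (label_ids : List Int) (divider : Int) (lid_tokens : List Int), Dom_get_lidbf_label_ids label_ids divider lid_tokens → Pre_get_lidbf_label_ids label_ids divider lid_tokens → Spec_get_lidbf_label_ids label_ids divider lid_tokens (get_lidbf_label_ids label_ids divider lid_tokens)

-- ===== LEMMAS AND PROOFS =====

-- proof-only: what A's loop appends after the initial marker, starting from key prev
def pvEmit (divider : Int) (lid_tokens : List Int) (prev : Nat) : List Int → List Int
  | [] => []
  | t :: ts =>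
    if pvKey divider t = prev then t :: pvEmit divider lid_tokens prev ts
    else lid_tokens.getD (pvKey divider t) 0 :: t :: pvEmit divider lid_tokens (pvKey divider t) ts

-- proof-only: the marker (if any) B emits for one pair
def pvMark (divider : Int) (lid_tokens : List Int) (p : Int × Option Int) : List Int :=
  match p.2 with
  | none => [lid_tokens.getD (pvKey divider p.1) 0]
  | some prev =>
      if pvKey divider p.1 ≠ pvKey divider prev then [lid_tokens.getD (pvKey divider p.1) 0]
      else []

-- proof-only: the forward output B denotes, pair by pair
def pvEmitF (divider : Int) (lid_tokens : List Int) : List (Int × Option Int) → List Int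
  | [] => []
  | p :: ps => pvMark divider lid_tokens p ++ p.1 :: pvEmitF divider lid_tokens ps

theorem pvFoldA (divider : Int) (lid_tokens : List Int) :
    ∀ (xs : List Int) (prev : Nat) (acc : List Int),
      (xs.foldl (pvStepA divider lid_tokens) (prev, acc)).2
        = acc ++ pvEmit divider lid_tokens prev xs := by
  intro xs
  induction xs with
  | nil => intro prev acc; simp [pvEmit]
  | cons t ts ih =>
    intro prev acc
    by_cases h : pvKey divider t = prev
    · simp only [List.foldl_cons, pvStepA, pvEmit, h]
      have : (if t < divider then (0:Nat) else 1) = prev := h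
      simp [this, ih]
    · have hk : (if t < divider then (0:Nat) else 1) = pvKey divider t := rfl
      simp only [List.foldl_cons, pvStepA]
      rw [hk, if_neg h, ih, pvEmit, if_neg h]
      simp

theorem pvEmit_cons (divider : Int) (lid_tokens : List Int) (prev : Nat) (t : Int) (ts : List Int) :
    pvEmit divider lid_tokens prev (t :: ts)
      = (if pvKey divider t = prev then t :: pvEmit divider lid_tokens prev ts
         else lid_tokens.getD (pvKey divider t) 0 :: t :: pvEmit divider lid_tokens (pvKey divider t) ts) := rfl

theorem pvEmitF_cons (divider : Int) (lid_tokens : List Int) (p : Int × Option Int)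
    (ps : List (Int × Option Int)) :
    pvEmitF divider lid_tokens (p :: ps)
      = pvMark divider lid_tokens p ++ p.1 :: pvEmitF divider lid_tokens ps := rfl

theorem pvFoldB (divider : Int) (lid_tokens : List Int) :
    ∀ (ps : List (Int × Option Int)) (acc : List Int),
      (ps.reverse.foldl (pvStepB divider lid_tokens) acc)
        = acc ++ (pvEmitF divider lid_tokens ps).reverse := by
  intro ps
  induction ps with
  | nil => intro acc; simp [pvEmitF]
  | cons p ps ih =>
    intro acc
    simp only [List.reverse_cons, List.foldl_append, List.foldl_cons, List.foldl_nil, ih,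
      pvEmitF_cons, List.reverse_append, List.reverse_cons]
    match p with
    | (t, none) => simp [pvStepB, pvMark]
    | (t, some prev) =>
        by_cases h : pvKey divider t = pvKey divider prev
        · simp [pvStepB, pvMark, h]
        · simp [pvStepB, pvMark, h]

theorem pvZipEmit (divider : Int) (lid_tokens : List Int) :
    ∀ (t : List Int) (prev : Int),
      pvEmitF divider lid_tokens (t.zip (((prev :: t).dropLast).map some))
        = pvEmit divider lid_tokens (pvKey divider prev) t := by
  intro t
  induction t with
  | nil => intro prev; simp [pvEmitF, pvEmit]
  | cons u us ih =>
    intro prev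
    have hdl : (prev :: u :: us).dropLast = prev :: (u :: us).dropLast := by
      simp [List.dropLast]
    rw [hdl]
    simp only [List.map_cons, List.zip_cons_cons]
    rw [pvEmitF_cons, ih u, pvEmit_cons]
    by_cases h : pvKey divider u = pvKey divider prev
    · simp [pvMark, h]
    · simp [pvMark, h]

-- ===== VERDICT (by name: the statement is the Claim_ definition above) =====
theorem get_lidbf_label_ids_spec : Claim_equal_get_lidbf_label_ids := by
  intro label_ids divider lid_tokens _ _
  unfold Spec_get_lidbf_label_ids
  cases label_ids with
  | nil => rfl
  | cons h t =>
    simp only [get_lidbf_label_ids, get_lidbf_label_ids_alt,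
      if_neg (List.cons_ne_nil h t)]
    have hz : ((h :: t).zip (none :: (h :: t).dropLast.map some))
        = (h, (none : Option Int)) :: t.zip (((h :: t).dropLast).map some) := by
      simp
    rw [pvFoldA, hz, pvFoldB, pvEmitF_cons]
    rw [pvZipEmit divider lid_tokens t h]
    have hk : (if h < divider then (0:Nat) else 1) = pvKey divider h := rfl
    simp [hk, pvEmit, pvMark]
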